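-- pv_equiv track=rewrite | github.com/portada-git/py_order_text_blocks | portada_order_blocks/reorder_image_from_arcanum_blocks/block_utils.py | remove_tables_from_blocks
-- ===== SOURCE A (Python) =====
-- def get_block_label(block: dict) -> str:
--     """
--     Extracts the label of a block from its dictionary representation.
--
--     Parameters:
--         block (dict): A dictionary representing the block.
--
--     Returns:
--         str: The label of the block.
--     """
--     return block['label']
--
-- def remove_tables_from_blocks(blocks: list[dict]) -> list[dict]:
--     """
--     Removes blocks labeled as 'Table' and title blocks followed by
--     tables from the list of blocks.
--
--     Parameters:
--         blocks (list[dict]): A list of dictionaries representing blocks.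
--
--     Returns:
--         list[dict]: A list of dictionaries representing blocks
--                     with tables removed.
--     """
--
--     corrected_blocks = []
--     for i, block in enumerate(blocks):
--         # Skip blocks labeled as 'Table'
--         if get_block_label(block) == 'Table':
--             continue
--         # Skip title blocks followed by tables
--         elif (get_block_label(block) == 'Title' and i+1 < len(blocks)
--                 and get_block_label(blocks[i+1]) == 'Table'):
--             continue
--         # Append non-table blocks to the list of corrected blocks
--         corrected_blocks.append(block)
--     return corrected_blocks
-- ===== SOURCE B (Python) =====
-- def remove_tables_from_blocks(blocks: list[dict]) -> list[dict]:
--     kept = []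
--     next_was_table = False
--     for block in reversed(blocks):
--         label = block['label']
--         if label == 'Table':
--             pass
--         elif label == 'Title' and next_was_table:
--             pass
--         else:
--             kept.append(block)
--         next_was_table = (label == 'Table')
--     kept.reverse()
--     return kept
-- ===== Notes on version B (the rewrite author's own statement) =====
-- stated objective: alternative
-- what changed: Replaces the forward enumerate loop with an index-based blocks[i+1] lookahead by a reverse traversal carrying a boolean flag (was the following block a Table?), then reversing the kept list; no indexing at all.
import Mathlib
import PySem

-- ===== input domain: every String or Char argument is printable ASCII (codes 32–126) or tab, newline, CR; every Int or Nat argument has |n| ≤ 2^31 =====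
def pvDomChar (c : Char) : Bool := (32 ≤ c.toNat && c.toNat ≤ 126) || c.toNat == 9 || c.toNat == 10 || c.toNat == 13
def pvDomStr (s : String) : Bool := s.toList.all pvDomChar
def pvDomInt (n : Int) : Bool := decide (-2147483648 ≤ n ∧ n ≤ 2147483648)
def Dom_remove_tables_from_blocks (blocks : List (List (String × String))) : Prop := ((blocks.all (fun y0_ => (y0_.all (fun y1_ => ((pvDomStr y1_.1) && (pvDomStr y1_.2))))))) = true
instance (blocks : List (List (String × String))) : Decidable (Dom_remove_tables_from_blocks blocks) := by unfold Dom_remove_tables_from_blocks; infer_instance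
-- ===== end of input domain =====

-- B replaces A's forward enumerate loop with blocks[i+1] lookahead by a reverse traversal
-- carrying a 'next block was a Table' flag (objective: alternative decomposition, no indexing).

-- ===== PORT A =====
-- block['label']; exact under Pre_ (every block has a "label" key — Python raises KeyError otherwise)
def get_block_label (block : List (String × String)) : String :=
  ((block.find? (fun kv => kv.1 == "label")).map Prod.snd).getD ""

-- the 'for i, block in enumerate(blocks)' loop of A, carrying the index i
def rtfbLoopA (blocks : List (List (String × String))) :
    Nat → List (List (String × String)) → List (List (String × String)) → List (List (String × String))
  | _, [], acc => acc
  | i, b :: rest, acc =>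
    if get_block_label b == "Table" then
      rtfbLoopA blocks (i + 1) rest acc
    else if get_block_label b == "Title" && decide ((i : Int) + 1 < (blocks.length : Int))
            && (get_block_label ((PySem.List.pyGet? blocks ((i : Int) + 1)).getD []) == "Table") then
      rtfbLoopA blocks (i + 1) rest acc
    else
      rtfbLoopA blocks (i + 1) rest (acc ++ [b])

def remove_tables_from_blocks (blocks : List (List (String × String))) : List (List (String × String)) :=
  rtfbLoopA blocks 0 blocks []

-- ===== PORT B =====
-- block['label'] as B reads it (same KeyError domain as A's helper)
def pvLabelB (block : List (String × String)) : String :=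
  ((block.find? (fun kv => kv.1 == "label")).map Prod.snd).getD ""

-- the 'for block in reversed(blocks)' loop of B: state = (kept, next_was_table)
def rtfbLoopB :
    List (List (String × String)) → List (List (String × String)) → Bool → List (List (String × String))
  | [], kept, _ => kept
  | b :: rest, kept, nextWasTable =>
    rtfbLoopB rest
      (if pvLabelB b == "Table" then kept
       else if pvLabelB b == "Title" && nextWasTable then kept
       else kept ++ [b])
      (pvLabelB b == "Table")

def remove_tables_from_blocks_alt (blocks : List (List (String × String))) : List (List (String × String)) :=
  (rtfbLoopB blocks.reverse [] false).reverse

-- ===== PRECONDITION & SPEC =====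
-- Pre_ excludes exactly the inputs on which some block dict lacks the 'label' key: there Python A
-- (and Python B alike) raises KeyError instead of returning a value.
def Pre_remove_tables_from_blocks (blocks : List (List (String × String))) : Prop :=
  (blocks.all (fun b => b.any (fun kv => kv.1 == "label"))) = true
instance (blocks : List (List (String × String))) : Decidable (Pre_remove_tables_from_blocks blocks) := by
  unfold Pre_remove_tables_from_blocks; infer_instance

def pvWitness_remove_tables_from_blocks : (List (List (String × String))) :=
  [[("label", "Title")], [("label", "Table")], [("label", "Text")]]

def Spec_remove_tables_from_blocks (blocks : List (List (String × String))) (out : List (List (String × String))) : Prop := out = remove_tables_from_blocks_alt blocks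
instance (blocks : List (List (String × String))) (out : List (List (String × String))) : Decidable (Spec_remove_tables_from_blocks blocks out) := by unfold Spec_remove_tables_from_blocks; infer_instance

-- ===== CLAIM (what is proved, stated in full; the proofs are below) =====
def Claim_equal_remove_tables_from_blocks : Prop := ∀ (blocks : List (List (String × String))), Dom_remove_tables_from_blocks blocks → Pre_remove_tables_from_blocks blocks → Spec_remove_tables_from_blocks blocks (remove_tables_from_blocks blocks)

-- ===== LEMMAS AND PROOFS =====

-- canonical forward spec: `f` is the 'next block is a Table' flag for the LAST element of the list
def pvFlagFor : List (List (String × String)) → Bool → Bool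
  | [], f => f
  | n :: _, _ => get_block_label n == "Table"

def pvSpecG : List (List (String × String)) → Bool → List (List (String × String))
  | [], _ => []
  | b :: rest, f =>
    (if get_block_label b == "Table" then []
     else if get_block_label b == "Title" && pvFlagFor rest f then []
     else [b]) ++ pvSpecG rest f

lemma pvFlagFor_append_singleton (xs : List (List (String × String))) (b : List (String × String)) (f : Bool) :
    pvFlagFor (xs ++ [b]) f = pvFlagFor xs (get_block_label b == "Table") := by
  cases xs <;> simp [pvFlagFor]

lemma pvSpecG_append_singleton (xs : List (List (String × String))) (b : List (String × String)) (f : Bool) :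
    pvSpecG (xs ++ [b]) f
      = pvSpecG xs (get_block_label b == "Table")
        ++ (if get_block_label b == "Table" then []
            else if get_block_label b == "Title" && f then []
            else [b]) := by
  induction xs generalizing f with
  | nil => simp [pvSpecG, pvFlagFor]
  | cons a xs ih => simp [pvSpecG, pvFlagFor_append_singleton, ih]

-- A's loop over the suffix `bs = blocks.drop k` computes pvSpecG of that suffix
lemma rtfbLoopA_eq (blocks : List (List (String × String))) :
    ∀ (bs : List (List (String × String))) (k : Nat) (acc : List (List (String × String))),
      blocks.drop k = bs → rtfbLoopA blocks k bs acc = acc ++ pvSpecG bs false := by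
  intro bs
  induction bs with
  | nil => intro k acc _; simp [rtfbLoopA, pvSpecG]
  | cons b rest ih =>
    intro k acc h
    have hk : k < blocks.length := by
      by_contra hle
      have hnil : blocks.drop k = [] := List.drop_eq_nil_of_le (by omega)
      rw [hnil] at h; simp at h
    have hrest : blocks.drop (k + 1) = rest := by
      have hd : (blocks.drop k).drop 1 = blocks.drop (k + 1) := by rw [List.drop_drop]
      rw [h] at hd; simpa using hd.symm
    cases rest with
    | nil =>
      have hlen : blocks.length = k + 1 := by
        by_contra hc
        have hne : blocks.drop (k + 1) ≠ [] := by
          simp [List.drop_eq_nil_iff]; omega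
        exact hne hrest
      have hguard : decide ((k : Int) + 1 < (blocks.length : Int)) = false := by
        simp [hlen]
      have step : rtfbLoopA blocks k [b] acc
          = (if get_block_label b == "Table" then rtfbLoopA blocks (k + 1) [] acc
             else if get_block_label b == "Title" && decide ((k : Int) + 1 < (blocks.length : Int))
                     && (get_block_label ((PySem.List.pyGet? blocks ((k : Int) + 1)).getD []) == "Table") then
               rtfbLoopA blocks (k + 1) [] acc
             else rtfbLoopA blocks (k + 1) [] (acc ++ [b])) := rfl
      rw [step, hguard]
      simp only [Bool.and_false, Bool.false_and, if_false, Bool.false_eq_true]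
      split_ifs <;> simp_all [rtfbLoopA, pvSpecG, pvFlagFor]
    | cons n rest' =>
      have hk1 : k + 1 < blocks.length := by
        by_contra hc
        have hnil : blocks.drop (k + 1) = [] := List.drop_eq_nil_of_le (by omega)
        rw [hrest] at hnil; simp at hnil
      have hget : PySem.List.pyGet? blocks ((k : Int) + 1) = some n := by
        have hcast : ((k : Int) + 1) = ((k + 1 : Nat) : Int) := by push_cast; ring
        rw [hcast, PySem.List.pyGet?_natCast]
        have h0 : (blocks.drop (k + 1))[0]? = blocks[k + 1 + 0]? := List.getElem?_drop
        rw [hrest] at h0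
        simpa using h0.symm
      have hguard : decide ((k : Int) + 1 < (blocks.length : Int)) = true := by
        simp; exact_mod_cast hk1
      have hrec : ∀ acc', rtfbLoopA blocks (k + 1) (n :: rest') acc'
          = acc' ++ pvSpecG (n :: rest') false := fun acc' => ih (k + 1) acc' hrest
      have step : rtfbLoopA blocks k (b :: n :: rest') acc
          = (if get_block_label b == "Table" then rtfbLoopA blocks (k + 1) (n :: rest') acc
             else if get_block_label b == "Title" && decide ((k : Int) + 1 < (blocks.length : Int))
                     && (get_block_label ((PySem.List.pyGet? blocks ((k : Int) + 1)).getD []) == "Table") then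
               rtfbLoopA blocks (k + 1) (n :: rest') acc
             else rtfbLoopA blocks (k + 1) (n :: rest') (acc ++ [b])) := rfl
      rw [step, hguard, hget]
      simp only [Option.getD_some, Bool.and_true]
      have hflag : pvFlagFor (n :: rest') false = (get_block_label n == "Table") := rfl
      split_ifs with h1 h2
      · simp_all [pvSpecG]
      · simp_all [pvSpecG]
      · have hcond : ¬(get_block_label b = "Title" ∧ get_block_label n = "Table") := by
          simpa using h2
        rw [hrec]
        simp [pvSpecG, hflag, h1, hcond, List.append_assoc]

-- B's loop appends to `kept` what it collects (in reverse input order)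
def pvRevSpec : List (List (String × String)) → Bool → List (List (String × String))
  | [], _ => []
  | b :: rest, flag =>
    (if get_block_label b == "Table" then []
     else if get_block_label b == "Title" && flag then []
     else [b]) ++ pvRevSpec rest (get_block_label b == "Table")

lemma rtfbLoopB_eq :
    ∀ (bs kept : List (List (String × String))) (flag : Bool),
      rtfbLoopB bs kept flag = kept ++ pvRevSpec bs flag := by
  intro bs
  induction bs with
  | nil => intro kept flag; simp [rtfbLoopB, pvRevSpec]
  | cons b rest ih =>
    intro kept flag
    have hL : pvLabelB b = get_block_label b := rfl
    simp only [rtfbLoopB, hL, ih, pvRevSpec]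
    split_ifs <;> simp [List.append_assoc]

lemma pvRevSpec_reverse :
    ∀ (bs : List (List (String × String))) (flag : Bool),
      (pvRevSpec bs flag).reverse = pvSpecG bs.reverse flag := by
  intro bs
  induction bs with
  | nil => intro flag; simp [pvRevSpec, pvSpecG]
  | cons b rest ih =>
    intro flag
    simp only [pvRevSpec, List.reverse_append, List.reverse_cons, ih, pvSpecG_append_singleton]
    congr 1
    split_ifs <;> simp

-- ===== VERDICT (by name: the statement is the Claim_ definition above) =====
theorem remove_tables_from_blocks_spec : Claim_equal_remove_tables_from_blocks := by
  intro blocks _ _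
  unfold Spec_remove_tables_from_blocks remove_tables_from_blocks remove_tables_from_blocks_alt
  rw [rtfbLoopA_eq blocks blocks 0 [] rfl]
  simp [rtfbLoopB_eq, pvRevSpec_reverse]
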